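-- pv_equiv track=rewrite | github.com/reedhodges/advent_of_code_2023 | aoc-15.py | hash_algo
-- ===== SOURCE A (Python) =====
-- def hash_algo(st):
--     '''
--     Function that applies the HASH algorithm to a string.
--     '''
--     # split string into a list of characters
--     st = list(st)
--     # get the ASCII values of each character
--     st = [ord(c) for c in st]
--     # initialize answer
--     ans = 0
--     # iterate over the list
--     for ch in st:
--         ans += ch
--         ans = 17 * ans
--         ans = ans % 256
--     return ans
-- ===== SOURCE B (Python) =====
-- def hash_algo(st):
--     '''
--     Function that applies the HASH algorithm to a string.
--     '''
--     # expanded polynomial: sum of ord(c) * 17^(distance from end), mod 256,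
--     # accumulated back-to-front with a rolling power of 17
--     total = 0
--     power = 17
--     for c in reversed(st):
--         total = (total + ord(c) * power) % 256
--         power = (power * 17) % 256
--     return total
-- ===== Notes on version B (the rewrite author's own statement) =====
-- stated objective: alternative
-- what changed: Replaces Horner's rolling update (ans = 17*(ans+ord(c)) % 256 left-to-right) by the expanded polynomial: a single back-to-front pass accumulating ord(c)*power with a rolling power of 17 reduced mod 256.
import Mathlib
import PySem

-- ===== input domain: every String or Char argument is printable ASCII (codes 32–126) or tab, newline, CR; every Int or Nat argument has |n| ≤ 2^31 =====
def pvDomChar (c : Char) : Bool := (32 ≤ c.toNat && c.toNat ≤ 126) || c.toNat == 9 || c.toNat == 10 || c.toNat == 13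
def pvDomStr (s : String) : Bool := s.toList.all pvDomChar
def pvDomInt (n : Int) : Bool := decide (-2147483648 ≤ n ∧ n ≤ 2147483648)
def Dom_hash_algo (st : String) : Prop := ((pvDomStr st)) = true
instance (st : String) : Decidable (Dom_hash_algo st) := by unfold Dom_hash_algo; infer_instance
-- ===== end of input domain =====

-- B computes the HASH as the expanded polynomial back-to-front with a rolling power of 17 (alternative decomposition, same cost).


-- ===== PORT A =====
-- st = [ord(c) for c in st]; then the rolling Horner loop ans = 17*(ans+ch) % 256
def hash_algo (st : String) : Int :=
  ((st.toList.map (fun c => (c.toNat : Int))).foldl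
    (fun ans ch => PySem.Int.mod (17 * (ans + ch)) 256) 0)

-- ===== PORT B =====
-- back-to-front pass over the characters with state (total, power)
def hash_algo_alt (st : String) : Int :=
  (st.toList.reverse.foldl
    (fun (s : Int × Int) c =>
      (PySem.Int.mod (s.1 + (c.toNat : Int) * s.2) 256, PySem.Int.mod (s.2 * 17) 256))
    (0, 17)).1

-- ===== PRECONDITION & SPEC =====
def Spec_hash_algo (st : String) (out : Int) : Prop := out = hash_algo_alt st
instance (st : String) (out : Int) : Decidable (Spec_hash_algo st out) := by unfold Spec_hash_algo; infer_instance

-- ===== CLAIM (what is proved, stated in full; the proofs are below) =====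
def Claim_equal_hash_algo : Prop := ∀ (st : String), Dom_hash_algo st → Spec_hash_algo st (hash_algo st)

-- ===== LEMMAS AND PROOFS =====

-- A's loop over the ASCII codes
def pvFA (l : List Int) (a : Int) : Int :=
  l.foldl (fun ans ch => (17 * (ans + ch)) % 256) a

-- B's loop over the reversed ASCII codes
def pvFB (r : List Int) (s : Int × Int) : Int × Int :=
  r.foldl (fun s c => ((s.1 + c * s.2) % 256, (s.2 * 17) % 256)) s

-- the polynomial read front-to-back with weights 17^(distance from end)
def pvP : List Int → Int
  | [] => 0
  | c :: l => 17 ^ (l.length + 1) * c + pvP l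

-- the polynomial read back-to-front (argument is the reversed list)
def pvQ : List Int → Int
  | [] => 0
  | c :: r => c + 17 * pvQ r

theorem pvQ_append (r : List Int) (c : Int) : pvQ (r ++ [c]) = pvQ r + 17 ^ r.length * c := by
  induction r with
  | nil => simp [pvQ]
  | cons c' r ih => simp [pvQ, ih, pow_succ]; ring

theorem pvPQ (l : List Int) : pvP l = 17 * pvQ l.reverse := by
  induction l with
  | nil => simp [pvP, pvQ]
  | cons c l ih =>
      simp [pvP, List.reverse_cons, pvQ_append, ih, pow_succ]
      ring

theorem pvFB_eval (r : List Int) : ∀ (t p : Int),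
    (pvFB r (t % 256, p)).1 = (t + p * pvQ r) % 256 := by
  induction r with
  | nil => intro t p; simp [pvFB, pvQ]
  | cons c r ih =>
      intro t p
      have hstep : (t % 256 + c * p) % 256 = (t + c * p) % 256 := by
        rw [Int.add_emod, Int.emod_emod_of_dvd _ dvd_rfl, ← Int.add_emod]
      show (pvFB r ((t % 256 + c * p) % 256, (p * 17) % 256)).1 = _
      rw [hstep]
      rw [ih (t + c * p) ((p * 17) % 256)]
      have h : (t + c * p + (p * 17) % 256 * pvQ r) % 256
             = (t + c * p + (p * 17) * pvQ r) % 256 :=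
        Int.ModEq.add_left _ (Int.ModEq.mul_right _ (Int.emod_emod_of_dvd _ dvd_rfl))
      rw [h]; ring_nf; rw [pvQ]; ring_nf

theorem pvFA_eval (l : List Int) : ∀ (c a : Int),
    pvFA (c :: l) a = (17 ^ (l.length + 1) * a + pvP (c :: l)) % 256 := by
  induction l with
  | nil =>
      intro c a
      simp [pvFA, pvP]
      ring_nf
  | cons c' l ih =>
      intro c a
      show pvFA (c' :: l) ((17 * (a + c)) % 256) = _
      rw [ih c' ((17 * (a + c)) % 256)]
      have h : (17 ^ (l.length + 1) * ((17 * (a + c)) % 256) + pvP (c' :: l)) % 256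
             = (17 ^ (l.length + 1) * (17 * (a + c)) + pvP (c' :: l)) % 256 :=
        Int.ModEq.add_right _ (Int.ModEq.mul_left _ (Int.emod_emod_of_dvd _ dvd_rfl))
      rw [h]
      have : (17:Int) ^ (l.length + 1) * (17 * (a + c)) + pvP (c' :: l)
           = 17 ^ (l.length + 1 + 1) * a + pvP (c :: c' :: l) := by
        simp [pvP, pow_succ]; ring
      rw [this]
      rfl

theorem pvA_as_fA (st : String) :
    hash_algo st = pvFA (st.toList.map (fun c => (c.toNat : Int))) 0 := by
  simp [hash_algo, pvFA]

theorem pvB_as_fB (st : String) :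
    hash_algo_alt st = (pvFB (st.toList.map (fun c => (c.toNat : Int))).reverse (0, 17)).1 := by
  simp [hash_algo_alt, pvFB, List.foldr_map]

-- ===== VERDICT (by name: the statement is the Claim_ definition above) =====
theorem hash_algo_spec : Claim_equal_hash_algo := by
  intro st _
  unfold Spec_hash_algo
  rw [pvA_as_fA, pvB_as_fB]
  cases h : st.toList.map (fun c => (c.toNat : Int)) with
  | nil => rfl
  | cons c l =>
      rw [pvFA_eval]
      have h0 : ((0:Int), (17:Int)) = ((0:Int) % 256, (17:Int)) := by norm_num
      rw [h0, pvFB_eval]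
      rw [← pvPQ]
      simp
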